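-- pv_equiv track=rewrite | github.com/ctfcompfest/compfest12-qualification | web/codebackup/web/lib/myrandom.py | convert
-- ===== SOURCE A (Python) =====
-- def convert(n, x):
--     ret = 0
--     accum = 0
--     for i in range((n << 1) - 1, -1, -1):
--         accum = (accum << 1) | ((x >> i) & 1)
--         if (i & 1) == 0:
--             ret = ((ret << (1 << 1)) << 1) + (ret << 1) + accum
--             accum >>= 1 << 1
--     if not(ret & ret ^ (1 << 8)):
--         ret = ret | (1 << 1 << 1 << 1)
--     return ret | (1 << (1 << 1 << 1 << 1))
-- ===== SOURCE B (Python) =====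
-- def convert(n, x):
--     # Only the low s base-4 digits of x are significant; above them every digit
--     # is 0 (x >= 0) or 3 (x < 0), and the 3-digit tail has the closed form
--     # 3 * (10**s + ... + 10**(m-1)) = (10**m - 10**s) // 3.
--     m = max(n, 0)
--     s = min(m, (x.bit_length() + 1) // 2)
--     ret = sum(((x >> (2 * k)) & 3) * 10 ** k for k in range(s))
--     if x < 0:
--         ret += (10 ** m - 10 ** s) // 3
--     if ret == 256:
--         ret |= 8
--     return ret | 256
-- ===== Notes on version B (the rewrite author's own statement) =====
-- stated objective: faster
-- what changed: A walks all 2n bits of the range, rebuilding each base-4 digit in an accumulator and folding it in with an obfuscated shift/add Horner step; B sums only the s significant digits (s bounded by x.bit_length()) with decimal weights and replaces the whole 0/3 sign-extension tail by the closed form (10**m - 10**s)//3, keeping the ret==256 -> ret|=8 backdoor and the final | 256.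
import Mathlib
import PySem

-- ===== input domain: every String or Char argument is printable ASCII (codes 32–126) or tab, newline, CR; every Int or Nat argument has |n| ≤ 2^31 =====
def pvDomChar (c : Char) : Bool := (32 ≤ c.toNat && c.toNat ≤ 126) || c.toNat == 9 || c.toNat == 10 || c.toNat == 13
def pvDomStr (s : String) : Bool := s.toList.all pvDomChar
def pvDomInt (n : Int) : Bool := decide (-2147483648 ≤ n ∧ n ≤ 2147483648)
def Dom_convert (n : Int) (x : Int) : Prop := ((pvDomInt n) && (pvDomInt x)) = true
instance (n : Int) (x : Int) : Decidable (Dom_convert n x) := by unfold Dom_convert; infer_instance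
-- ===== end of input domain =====

-- B replaces A's obfuscated bit-by-bit Horner loop over all 2n bits by a sum over only the significant base-4 digits plus a closed form (10**m - 10**s)//3 for the 0/3 sign-extension tail (objective: faster; measured).

-- ===== PORT A =====
-- loop body: accum = (accum << 1) | ((x >> i) & 1); if i even: ret = ((ret << (1<<1)) << 1) + (ret << 1) + accum; accum >>= 1 << 1
-- (i ≥ 0 for every i the loop visits, so `.toNat` on the shift amount is exact; constant shift amounts 1<<1 = 2 written as the Nat 2)
def convertStep (x : Int) (st : Int × Int) (i : Int) : Int × Int :=
  let accum := PySem.Int.bor (st.2 <<< (1:Nat)) (PySem.Int.band (x >>> i.toNat) 1)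
  if PySem.Int.band i 1 = 0 then
    (((st.1 <<< (2:Nat)) <<< (1:Nat)) + (st.1 <<< (1:Nat)) + accum, accum >>> (2:Nat))
  else
    (st.1, accum)

def convert (n : Int) (x : Int) : Int :=
  let st := (PySem.List.pyRange ((n <<< (1:Nat)) - 1) (-1) (-1)).foldl (convertStep x) (0, 0)
  let ret := st.1
  -- if not(ret & ret ^ (1 << 8)): ret = ret | (1 << 1 << 1 << 1)
  let ret := if PySem.Int.bxor (PySem.Int.band ret ret) ((1:Int) <<< (8:Nat)) = 0
             then PySem.Int.bor ret ((((1:Int) <<< (1:Nat)) <<< (1:Nat)) <<< (1:Nat))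
             else ret
  -- return ret | (1 << (1 << 1 << 1 << 1))  — the exponent 1<<1<<1<<1 = 8 written as the Nat 8
  PySem.Int.bor ret ((1:Int) <<< (8:Nat))

-- ===== PORT B =====
-- m = max(n, 0); s = min(m, (x.bit_length() + 1) // 2)
-- ret = sum(((x >> (2*k)) & 3) * 10**k for k in range(s))
-- if x < 0: ret += (10**m - 10**s) // 3
-- if ret == 256: ret |= 8
-- return ret | 256          (k ≥ 0 and 0 ≤ s ≤ m, so `.toNat` on shift amounts/exponents is exact)
def convert_alt (n : Int) (x : Int) : Int :=
  let m := max n 0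
  let s := min m (PySem.Int.floordiv ((PySem.Int.bitLength x : Int) + 1) 2)
  let ret := (PySem.List.pyRange 0 s 1).foldl
      (fun acc k => acc + PySem.Int.band (x >>> (2 * k).toNat) 3 * 10 ^ k.toNat) 0
  let ret := if x < 0 then ret + PySem.Int.floordiv (10 ^ m.toNat - 10 ^ s.toNat) 3 else ret
  let ret := if ret = 256 then PySem.Int.bor ret 8 else ret
  PySem.Int.bor ret 256

-- ===== PRECONDITION & SPEC =====
def Spec_convert (n : Int) (x : Int) (out : Int) : Prop := out = convert_alt n x
instance (n : Int) (x : Int) (out : Int) : Decidable (Spec_convert n x out) := by unfold Spec_convert; infer_instance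

-- ===== CLAIM (what is proved, stated in full; the proofs are below) =====
def Claim_equal_convert : Prop := ∀ (n : Int) (x : Int), Dom_convert n x → Spec_convert n x (convert n x)

-- ===== LEMMAS AND PROOFS =====

-- the common value of both loops: Σ_{k<m} ((x >> 2k) & 3) · 10^k
def digitSum (x : Int) (m : Nat) : Int :=
  ∑ k ∈ Finset.range m, PySem.Int.band (x >>> (2*k)) 3 * 10 ^ k

theorem nat_and3 (a : Nat) : a &&& 3 = a % 4 := by
  have := Nat.and_two_pow_sub_one_eq_mod a 2
  norm_num at this; omega

theorem band1_eq (y : Int) : PySem.Int.band y 1 = y % 2 := by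
  rw [PySem.Int.band_one, PySem.Int.mod_eq_emod_of_pos (by norm_num)]

theorem band3_eq (y : Int) : PySem.Int.band y 3 = 2 * ((y / 2) % 2) + y % 2 := by
  unfold PySem.Int.band
  by_cases h : 0 ≤ y
  · simp only [h, if_pos, show (0:Int) ≤ 3 by norm_num]
    rw [show Int.toNat 3 = 3 from rfl, nat_and3]
    omega
  · rw [if_neg h, if_pos (show (0:Int) ≤ 3 by norm_num)]
    rw [show Int.toNat 3 = 3 from rfl, Nat.and_comm, nat_and3]
    omega

theorem bor_bits (a b : Int) (ha : a = 0 ∨ a = 1) (hb : b = 0 ∨ b = 1) :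
    PySem.Int.bor (a <<< (1:Nat)) b = 2 * a + b := by
  rcases ha with ha | ha <;> rcases hb with hb | hb <;> subst ha <;> subst hb <;> decide

theorem loopA (x : Int) (m : Nat) : ∀ r : Int,
    (PySem.List.pyRange (2*(m:Int) - 1) (-1) (-1)).foldl (convertStep x) (r, 0)
    = (r * 10 ^ m + digitSum x m, 0) := by
  induction m with
  | zero =>
    intro r
    rw [show (2*((0:Nat):Int) - 1) = -1 by norm_num,
        PySem.List.pyRange_neg_one_eq_nil (by norm_num)]
    simp [digitSum]
  | succ m ih =>
    intro r
    have hcast : (2*((m+1:Nat):Int) - 1) = 2*(m:Int) + 1 := by push_cast; ring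
    rw [hcast, PySem.List.pyRange_neg_one_cons (by omega),
        show (2*(m:Int) + 1 - 1) = 2*(m:Int) by ring,
        PySem.List.pyRange_neg_one_cons (by omega)]
    have hodd : convertStep x (r, 0) (2*(m:Int) + 1) = (r, (x >>> (2*m+1)) % 2) := by
      unfold convertStep
      rw [if_neg (by rw [band1_eq]; omega)]
      simp only [Prod.mk.injEq]
      refine ⟨trivial, ?_⟩
      rw [show ((0:Int) <<< (1:Nat)) = 0 by decide, PySem.Int.bor_comm, PySem.Int.bor_zero,
          band1_eq, show (2*(m:Int) + 1).toNat = 2*m+1 by omega]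
    have hb1 : (x >>> (2*m+1)) % 2 = 0 ∨ (x >>> (2*m+1)) % 2 = 1 := by omega
    have hb0 : (x >>> (2*m)) % 2 = 0 ∨ (x >>> (2*m)) % 2 = 1 := by omega
    have hsplit : x >>> (2*m+1) = (x >>> (2*m)) / 2 := by
      rw [Int.shiftRight_eq_div_pow, Int.shiftRight_eq_div_pow,
          Int.ediv_ediv_of_nonneg (by positivity)]
      push_cast
      rw [pow_succ]
    have heven : convertStep x (r, (x >>> (2*m+1)) % 2) (2*(m:Int)) =
        (10 * r + PySem.Int.band (x >>> (2*m)) 3, 0) := by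
      unfold convertStep
      rw [if_pos (by rw [band1_eq]; omega)]
      simp only [Prod.mk.injEq]
      rw [show (2*(m:Int)).toNat = 2*m by omega, band1_eq,
          bor_bits _ _ hb1 hb0]
      constructor
      · rw [band3_eq, hsplit, Int.shiftLeft_eq, Int.shiftLeft_eq, Int.shiftLeft_eq]; ring
      · rw [Int.shiftRight_eq_div_pow, show (((2:Nat)^2 : Nat) : Int) = 4 by norm_num]
        omega
    rw [List.foldl_cons, hodd, List.foldl_cons, heven, ih]
    unfold digitSum
    rw [Finset.sum_range_succ]
    ring_nf

theorem loopB (x : Int) (m : Nat) :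
    (PySem.List.pyRange 0 (m:Int) 1).foldl
      (fun acc k => acc + PySem.Int.band (x >>> (2 * k).toNat) 3 * 10 ^ k.toNat) 0
    = digitSum x m := by
  induction m with
  | zero => rw [show ((0:Nat):Int) = 0 by norm_num, PySem.List.pyRange_one_eq_nil (by norm_num)]
            simp [digitSum]
  | succ m ih =>
    rw [show ((m+1:Nat):Int) = (m:Int) + 1 by push_cast; ring,
        PySem.List.pyRange_one_succ_right (by positivity), List.foldl_append, ih]
    simp only [List.foldl_cons, List.foldl_nil]
    rw [show (2*((m:Nat):Int)).toNat = 2*m by omega, show ((m:Nat):Int).toNat = m by omega,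
        Int.shiftRight_natCast_right]
    unfold digitSum
    rw [Finset.sum_range_succ]

theorem digitSum_nonneg (x : Int) (m : Nat) : 0 ≤ digitSum x m := by
  unfold digitSum
  apply Finset.sum_nonneg
  intro k _
  have hband : 0 ≤ PySem.Int.band (x >>> (2*k)) 3 := by rw [band3_eq]; omega
  positivity

theorem ediv_neg_one (x P : Int) (hP : 0 < P) (h1 : -P ≤ x) (h2 : x < 0) : x / P = -1 := by
  have h := Int.mul_ediv_add_emod x P
  have h3 := Int.emod_nonneg x (by omega : P ≠ 0)
  have h4 := Int.emod_lt_of_pos x hP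
  have hq1 : x / P ≤ -1 := by
    by_contra hc
    have : 0 ≤ x / P := by omega
    nlinarith
  have hq2 : -1 ≤ x / P := by
    by_contra hc
    have : x / P ≤ -2 := by omega
    nlinarith
  omega

theorem shift_hi_zero (x : Int) (k : Nat) (hx : 0 ≤ x) (hk : PySem.Int.bitLength x ≤ 2*k) :
    PySem.Int.band (x >>> (2*k)) 3 = 0 := by
  have h1 := PySem.Int.lt_two_pow_bitLength x
  have h2 : (2:Nat)^(PySem.Int.bitLength x) ≤ 2^(2*k) := Nat.pow_le_pow_right (by norm_num) hk
  have hlt : x < ((2^(2*k) : Nat) : Int) := by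
    have := lt_of_lt_of_le h1 h2
    omega
  rw [Int.shiftRight_eq_div_pow, Int.ediv_eq_zero_of_lt hx hlt]
  decide

theorem shift_hi_neg (x : Int) (k : Nat) (hx : x < 0) (hk : PySem.Int.bitLength x ≤ 2*k) :
    PySem.Int.band (x >>> (2*k)) 3 = 3 := by
  have h1 := PySem.Int.lt_two_pow_bitLength x
  have h2 : (2:Nat)^(PySem.Int.bitLength x) ≤ 2^(2*k) := Nat.pow_le_pow_right (by norm_num) hk
  have hge : -((2^(2*k) : Nat) : Int) ≤ x := by
    have := lt_of_lt_of_le h1 h2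
    omega
  rw [Int.shiftRight_eq_div_pow,
      ediv_neg_one x _ (by positivity) hge hx]
  decide

theorem geom_tail (s m : Nat) (hsm : s ≤ m) :
    PySem.Int.floordiv ((10:Int)^m - 10^s) 3 = ∑ k ∈ Finset.Ico s m, 3 * (10:Int)^k := by
  have h9 : (10:Int)^m - 10^s = 3 * (3 * ∑ k ∈ Finset.Ico s m, (10:Int)^k) := by
    have := geom_sum_Ico_mul (10:Int) hsm
    linarith
  rw [PySem.Int.floordiv_eq_ediv_of_pos (by norm_num), h9,
      Int.mul_ediv_cancel_left _ (by norm_num), Finset.mul_sum]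

theorem digitSum_full (x : Int) (mN : Nat) :
    digitSum x mN = digitSum x (min mN ((PySem.Int.bitLength x + 1)/2))
      + (if x < 0
         then PySem.Int.floordiv ((10:Int)^mN - 10^(min mN ((PySem.Int.bitLength x + 1)/2))) 3
         else 0) := by
  have hsm : min mN ((PySem.Int.bitLength x + 1)/2) ≤ mN := min_le_left _ _
  have hkey : ∀ k, min mN ((PySem.Int.bitLength x + 1)/2) ≤ k → k < mN →
      PySem.Int.bitLength x ≤ 2*k := by omega
  have hsplit : digitSum x mN = digitSum x (min mN ((PySem.Int.bitLength x + 1)/2))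
      + ∑ k ∈ Finset.Ico (min mN ((PySem.Int.bitLength x + 1)/2)) mN,
          PySem.Int.band (x >>> (2*k)) 3 * 10^k := by
    unfold digitSum
    rw [Finset.range_eq_Ico, ← Finset.sum_Ico_consecutive _ (Nat.zero_le _) hsm]
  rw [hsplit]
  by_cases hx : x < 0
  · rw [if_pos hx, geom_tail _ _ hsm]
    congr 1
    refine Finset.sum_congr rfl (fun k hk => ?_)
    rw [Finset.mem_Ico] at hk
    rw [shift_hi_neg x k hx (hkey k hk.1 hk.2)]
  · rw [if_neg hx]
    have : ∑ k ∈ Finset.Ico (min mN ((PySem.Int.bitLength x + 1)/2)) mN,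
        PySem.Int.band (x >>> (2*k)) 3 * 10^k = 0 := by
      refine Finset.sum_eq_zero (fun k hk => ?_)
      rw [Finset.mem_Ico] at hk
      rw [shift_hi_zero x k (by omega) (hkey k hk.1 hk.2), zero_mul]
    rw [this]

theorem tail_nonneg (s m : Nat) (hsm : s ≤ m) :
    0 ≤ PySem.Int.floordiv ((10:Int)^m - 10^s) 3 := by
  rw [PySem.Int.floordiv_eq_ediv_of_pos (by norm_num)]
  have : (10:Int)^s ≤ 10^m := pow_le_pow_right₀ (by norm_num) hsm
  exact Int.ediv_nonneg (by omega) (by norm_num)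

theorem tail_eq (r : Int) (hr : 0 ≤ r) :
    PySem.Int.bor (if PySem.Int.bxor (PySem.Int.band r r) ((1:Int) <<< (8:Nat)) = 0
                   then PySem.Int.bor r ((((1:Int) <<< (1:Nat)) <<< (1:Nat)) <<< (1:Nat))
                   else r) ((1:Int) <<< (8:Nat))
    = PySem.Int.bor (if r = 256 then PySem.Int.bor r 8 else r) 256 := by
  have hcond : (PySem.Int.bxor (PySem.Int.band r r) ((1:Int) <<< (8:Nat)) = 0) ↔ r = 256 := by
    rw [PySem.Int.band_self, show ((1:Int) <<< (8:Nat)) = 256 by decide,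
        PySem.Int.bxor_of_nonneg hr (by norm_num)]
    constructor
    · intro h
      have : r.toNat ^^^ (256:Int).toNat = 0 := by exact_mod_cast h
      rw [Nat.xor_eq_zero_iff] at this
      omega
    · intro h; subst h; decide
  rw [show ((((1:Int) <<< (1:Nat)) <<< (1:Nat)) <<< (1:Nat)) = 8 by decide,
      show ((1:Int) <<< (8:Nat)) = 256 by decide]
  by_cases h : r = 256
  · rw [if_pos ((by rw [show ((1:Int) <<< (8:Nat)) = 256 by decide] at hcond; exact hcond.mpr h)), if_pos h]
  · rw [if_neg (by rw [show ((1:Int) <<< (8:Nat)) = 256 by decide] at hcond; exact fun hc => h (hcond.mp hc)), if_neg h]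

-- ===== VERDICT (by name: the statement is the Claim_ definition above) =====
theorem convert_spec : Claim_equal_convert := by
  intro n x _
  unfold Spec_convert
  set mN := (max n 0).toNat with hmN
  set sN := min mN ((PySem.Int.bitLength x + 1)/2) with hsN
  have hA : convert n x
      = PySem.Int.bor (if PySem.Int.bxor (PySem.Int.band (digitSum x mN) (digitSum x mN)) ((1:Int) <<< (8:Nat)) = 0
                       then PySem.Int.bor (digitSum x mN) ((((1:Int) <<< (1:Nat)) <<< (1:Nat)) <<< (1:Nat))
                       else digitSum x mN) ((1:Int) <<< (8:Nat)) := by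
    unfold convert
    by_cases hn : n ≤ 0
    · rw [show (n <<< (1:Nat)) - 1 = 2*n - 1 by rw [Int.shiftLeft_eq]; ring,
          PySem.List.pyRange_neg_one_eq_nil (by omega),
          show mN = 0 by omega]
      simp [digitSum]
    · rw [show (n <<< (1:Nat)) - 1 = 2*((mN : Nat) : Int) - 1 by rw [Int.shiftLeft_eq]; omega,
          loopA x mN 0]
      simp only [zero_mul, zero_add]
  have hB : convert_alt n x
      = PySem.Int.bor
          (if (digitSum x sN + (if x < 0 then PySem.Int.floordiv ((10:Int)^mN - 10^sN) 3 else 0)) = 256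
           then PySem.Int.bor (digitSum x sN + (if x < 0 then PySem.Int.floordiv ((10:Int)^mN - 10^sN) 3 else 0)) 8
           else digitSum x sN + (if x < 0 then PySem.Int.floordiv ((10:Int)^mN - 10^sN) 3 else 0)) 256 := by
    simp only [convert_alt]
    have hfloor : PySem.Int.floordiv ((PySem.Int.bitLength x : Int) + 1) 2
        = (((PySem.Int.bitLength x + 1)/2 : Nat) : Int) := by
      rw [show ((PySem.Int.bitLength x : Int) + 1) = (((PySem.Int.bitLength x + 1) : Nat) : Int) by push_cast; ring]
      exact_mod_cast PySem.Int.floordiv_natCast _ 2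
    rw [show max n 0 = ((mN : Nat) : Int) by omega, hfloor, ← Nat.cast_min, ← hsN,
        loopB x sN, Int.toNat_natCast, Int.toNat_natCast]
    by_cases hx : x < 0
    · rw [if_pos hx, if_pos hx]
    · rw [if_neg hx, if_neg hx, add_zero]
  have hr : 0 ≤ digitSum x sN + (if x < 0 then PySem.Int.floordiv ((10:Int)^mN - 10^sN) 3 else 0) := by
    have h1 := digitSum_nonneg x sN
    by_cases hx : x < 0
    · rw [if_pos hx]
      have h2 := tail_nonneg sN mN (min_le_left _ _)
      omega
    · rw [if_neg hx]; omega
  rw [hA, hB]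
  have hfull := digitSum_full x mN
  rw [← hsN] at hfull
  rw [hfull]
  exact tail_eq _ hr
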